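-- pv_equiv track=rewrite | github.com/MegaGiciorPortas/WDI-Zadania | 02-tablice_jednowymiarowe/2.74.py | func
-- ===== SOURCE A (Python) =====
-- def func(T):
--     if len(T) <= 2:
--         return 2
--     wynik = 2
--     licznik = 2
--     for i in range(2, len(T)):
--         a = T[i - 2]
--         b = T[i - 1]
--         c = T[i]
--
--         if b * b == a * c:
--             licznik += 1
--         else:
--             if licznik > wynik:
--                 wynik = licznik
--             licznik = 2
--
--     if licznik > wynik:
--         wynik = licznik
--     return wynik
-- ===== SOURCE B (Python) =====
-- def func(T):
--     n = len(T)
--     if n <= 2: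
--         return 2
--     bits = ''.join('1' if T[i - 1] * T[i - 1] == T[i - 2] * T[i] else '0' for i in range(2, n))
--     return 2 + max(len(run) for run in bits.split('0'))
-- ===== Notes on version B (the rewrite author's own statement) =====
-- stated objective: alternative
-- what changed: Instead of one stateful loop carrying wynik/licznik, B builds the boolean table b*b==a*c as a bit string and returns 2 plus the longest run of consecutive 1s found by splitting the string on 0s.
import Mathlib
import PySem

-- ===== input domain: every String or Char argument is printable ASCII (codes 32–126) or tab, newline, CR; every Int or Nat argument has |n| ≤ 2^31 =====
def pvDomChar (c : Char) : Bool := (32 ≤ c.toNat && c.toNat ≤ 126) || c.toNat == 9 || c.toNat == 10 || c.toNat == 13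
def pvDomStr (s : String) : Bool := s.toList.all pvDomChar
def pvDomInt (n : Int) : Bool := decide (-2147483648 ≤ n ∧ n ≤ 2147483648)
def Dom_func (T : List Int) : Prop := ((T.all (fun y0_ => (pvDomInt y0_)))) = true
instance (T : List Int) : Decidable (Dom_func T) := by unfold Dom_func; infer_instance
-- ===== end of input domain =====

-- B replaces A's stateful wynik/licznik loop with a boolean table of the b*b==a*c tests
-- followed by a longest-run-of-True scan (split on False); same O(n) cost, different decomposition.

-- ===== PORT A =====
-- loop body of A; indices i-2, i-1, i are always in range for i ∈ range(2, len T),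
-- so pyGetD is exact here (Python never raises).
def funcStep (T : List Int) (s : Int × Int) (i : Int) : Int × Int :=
  let a := PySem.List.pyGetD T (i - 2) 0
  let b := PySem.List.pyGetD T (i - 1) 0
  let c := PySem.List.pyGetD T i 0
  if b * b = a * c then (s.1, s.2 + 1)
  else (if s.2 > s.1 then s.2 else s.1, 2)

def func (T : List Int) : Int :=
  if T.length ≤ 2 then 2
  else
    let s := (PySem.List.pyRange 2 T.length 1).foldl (funcStep T) (2, 2)
    if s.2 > s.1 then s.2 else s.1

-- ===== PORT B =====
-- '1' if T[i-1]*T[i-1] == T[i-2]*T[i] else '0'; the bit characters are ported as Bool.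
def condAt (T : List Int) (i : Int) : Bool :=
  PySem.List.pyGetD T (i - 1) 0 * PySem.List.pyGetD T (i - 1) 0
    == PySem.List.pyGetD T (i - 2) 0 * PySem.List.pyGetD T i 0

-- the bit string bits (True = '1')
def condList (T : List Int) : List Bool :=
  (PySem.List.pyRange 2 T.length 1).map (condAt T)

-- bits.split('0') with each piece replaced by its length ('len(run)')
def splitRuns : List Bool → List Nat
  | [] => [0]
  | true :: rest =>
      match splitRuns rest with
      | h :: t => (h + 1) :: t
      | [] => [1]
  | false :: rest => 0 :: splitRuns rest

def func_alt (T : List Int) : Int :=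
  if T.length ≤ 2 then 2
  else 2 + (((splitRuns (condList T)).foldl (fun m x => max m x) 0 : Nat) : Int)

-- ===== PRECONDITION & SPEC =====
def Spec_func (T : List Int) (out : Int) : Prop := out = func_alt T
instance (T : List Int) (out : Int) : Decidable (Spec_func T out) := by unfold Spec_func; infer_instance

-- ===== CLAIM (what is proved, stated in full; the proofs are below) =====
def Claim_equal_func : Prop := ∀ (T : List Int), Dom_func T → Spec_func T (func T)

-- ===== LEMMAS AND PROOFS =====

-- A's loop body, abstracted over the boolean test
def stepA (s : Int × Int) (c : Bool) : Int × Int :=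
  if c then (s.1, s.2 + 1) else (if s.2 > s.1 then s.2 else s.1, 2)

lemma funcStep_eq (T : List Int) (s : Int × Int) (i : Int) :
    funcStep T s i = stepA s (condAt T i) := by
  by_cases h : PySem.List.pyGetD T (i - 1) 0 * PySem.List.pyGetD T (i - 1) 0
      = PySem.List.pyGetD T (i - 2) 0 * PySem.List.pyGetD T i 0 <;>
    simp [funcStep, stepA, condAt, h]

-- add K to the head run (the current run extends the first piece)
def addHead (K : Nat) : List Nat → List Nat
  | [] => [K]
  | h :: t => (K + h) :: t

lemma splitRuns_ne_nil (L : List Bool) : splitRuns L ≠ [] := by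
  cases L with
  | nil => simp [splitRuns]
  | cons c rest =>
    cases c <;> simp [splitRuns]
    cases h : splitRuns rest <;> simp

lemma foldl_max_shift (rs : List Nat) : ∀ (a b : Nat),
    rs.foldl max (max a b) = max a (rs.foldl max b) := by
  induction rs with
  | nil => intro a b; simp
  | cons r t ih =>
      intro a b
      simp only [List.foldl_cons, Nat.max_assoc]
      exact ih a (max b r)

-- main invariant: A's final max over the remaining loop, started at (w, 2+K),
-- equals max w (2 + longest run where the first run of L is extended by K)
lemma loop_invariant (L : List Bool) : ∀ (w : Int) (K : Nat), 2 ≤ w →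
    (let s := L.foldl stepA (w, 2 + (K : Int));
      if s.2 > s.1 then s.2 else s.1)
    = max w (2 + (((addHead K (splitRuns L)).foldl max 0 : Nat) : Int)) := by
  induction L with
  | nil =>
      intro w K hw
      simp only [List.foldl_nil, splitRuns, addHead, List.foldl_cons, List.foldl_nil]
      simp only [Nat.max_comm 0, Nat.max_zero]
      rw [Int.max_def]
      push_cast
      split <;> split <;> omega
  | cons c rest ih =>
      intro w K hw
      cases c with
      | true =>
          have hstep : stepA (w, 2 + (K : Int)) true = (w, 2 + ((K + 1 : Nat) : Int)) := by
            simp [stepA]; ring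
          simp only [List.foldl_cons, hstep]
          rw [ih w (K + 1) hw]
          congr 2
          obtain ⟨h, t, hht⟩ : ∃ h t, splitRuns rest = h :: t := by
            cases hs : splitRuns rest with
            | nil => exact absurd hs (splitRuns_ne_nil rest)
            | cons h t => exact ⟨h, t, rfl⟩
          simp only [splitRuns, hht, addHead]
          have hk : K + (h + 1) = K + 1 + h := by omega
          rw [hk]
      | false =>
          have hmax : (if (2 + (K : Int)) > w then (2 + (K : Int)) else w)
              = max w (2 + (K : Int)) := by
            rw [Int.max_def]; split <;> split <;> omega
          have hstep : stepA (w, 2 + (K : Int)) false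
              = (max w (2 + (K : Int)), 2 + ((0 : Nat) : Int)) := by
            simp [stepA, hmax]
          simp only [List.foldl_cons, hstep]
          rw [ih (max w (2 + (K : Int))) 0 (le_trans hw (le_max_left _ _))]
          -- reshape the run lists on both sides
          have hside : addHead K (splitRuns (false :: rest)) = K :: splitRuns rest := by
            simp [splitRuns, addHead]
          have hzero : ∀ M : List Nat, M ≠ [] → addHead 0 M = M := by
            intro M hM; cases M with
            | nil => exact absurd rfl hM
            | cons h t => simp [addHead]
          rw [hside, hzero _ (splitRuns_ne_nil rest)]
          have hfold : (K :: splitRuns rest).foldl max 0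
              = max K ((splitRuns rest).foldl max 0) := by
            simp only [List.foldl_cons, Nat.max_comm 0 K]
            have := foldl_max_shift (splitRuns rest) K 0
            simpa using this
          rw [hfold, Int.max_def, Int.max_def, Int.max_def]
          push_cast
          split <;> split <;> split <;> omega

theorem func_eq_alt (T : List Int) : func T = func_alt T := by
  unfold func func_alt
  by_cases h : T.length ≤ 2
  · simp [h]
  · simp only [h, if_false]
    have hfold : (PySem.List.pyRange 2 T.length 1).foldl (funcStep T) (2, 2)
        = (condList T).foldl stepA (2, 2) := by
      unfold condList
      rw [List.foldl_map]
      congr 1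
      funext s i
      exact funcStep_eq T s i
    have h22 : ((2 : Int), (2 : Int)) = ((2 : Int), 2 + ((0 : Nat) : Int)) := by norm_num
    rw [hfold, h22]
    rw [loop_invariant (condList T) 2 0 (le_refl 2)]
    have hzero : addHead 0 (splitRuns (condList T)) = splitRuns (condList T) := by
      cases hs : splitRuns (condList T) with
      | nil => exact absurd hs (splitRuns_ne_nil _)
      | cons a t => simp [addHead]
    rw [hzero]
    have : ((splitRuns (condList T)).foldl (fun m x => max m x) 0 : Nat)
        = (splitRuns (condList T)).foldl max 0 := rfl
    rw [this, Int.max_def]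
    split <;> omega

-- ===== VERDICT (by name: the statement is the Claim_ definition above) =====
theorem func_spec : Claim_equal_func := by
  intro T _
  unfold Spec_func
  exact func_eq_alt T
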